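-- pv_equiv track=rewrite | github.com/HimanshuMahajan2111/Haki_FMCG | backend/agents/technical_agent/scope_analyzer.py | _generate_gap_recommendations
-- ===== SOURCE A (Python) =====
-- from typing import List, Dict, Any, Optional, Tuple
--
-- def _generate_gap_recommendations(
--
--     gaps: List[Dict[str, Any]],
--     product: Dict[str, Any]
-- ) -> List[str]:
--     """Generate recommendations to address gaps."""
--     recommendations = []
--
--     spec_gaps = [g for g in gaps if g['type'] == 'specification']
--     if spec_gaps:
--         recommendations.append("Consider specification relaxation or custom manufacturing")
--
--     cert_gaps = [g for g in gaps if g['type'] == 'certification']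
--     if cert_gaps:
--         recommendations.append("Request manufacturer to obtain missing certifications")
--
--     price_gaps = [g for g in gaps if g['type'] == 'price']
--     if price_gaps:
--         recommendations.append("Negotiate pricing or increase budget allocation")
--
--     delivery_gaps = [g for g in gaps if g['type'] == 'delivery']
--     if delivery_gaps:
--         recommendations.append("Adjust project timeline or request expedited delivery")
--
--     if not recommendations:
--         recommendations.append("Product meets all requirements - proceed with purchase")
--
--     return recommendations
-- ===== SOURCE B (Python) =====
-- def _generate_gap_recommendations(gaps, product):
--     """Generate recommendations to address gaps."""
--     spec = cert = price = deliv = False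
--     for g in gaps:
--         t = g['type']
--         if t == 'specification':
--             spec = True
--         elif t == 'certification':
--             cert = True
--         elif t == 'price':
--             price = True
--         elif t == 'delivery':
--             deliv = True
--         if spec and cert and price and deliv:
--             break
--     recommendations = []
--     if spec:
--         recommendations.append("Consider specification relaxation or custom manufacturing")
--     if cert:
--         recommendations.append("Request manufacturer to obtain missing certifications")
--     if price:
--         recommendations.append("Negotiate pricing or increase budget allocation")
--     if deliv:
--         recommendations.append("Adjust project timeline or request expedited delivery")
--     if not recommendations:
--         recommendations.append("Product meets all requirements - proceed with purchase")
--     return recommendations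
-- ===== Notes on version B (the rewrite author's own statement) =====
-- stated objective: alternative
-- what changed: a single pass over gaps maintaining four boolean flags with an early break once all four gap types are seen, then the recommendation list is assembled from the flags, replacing A's four separate filter passes over the whole list
import Mathlib
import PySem

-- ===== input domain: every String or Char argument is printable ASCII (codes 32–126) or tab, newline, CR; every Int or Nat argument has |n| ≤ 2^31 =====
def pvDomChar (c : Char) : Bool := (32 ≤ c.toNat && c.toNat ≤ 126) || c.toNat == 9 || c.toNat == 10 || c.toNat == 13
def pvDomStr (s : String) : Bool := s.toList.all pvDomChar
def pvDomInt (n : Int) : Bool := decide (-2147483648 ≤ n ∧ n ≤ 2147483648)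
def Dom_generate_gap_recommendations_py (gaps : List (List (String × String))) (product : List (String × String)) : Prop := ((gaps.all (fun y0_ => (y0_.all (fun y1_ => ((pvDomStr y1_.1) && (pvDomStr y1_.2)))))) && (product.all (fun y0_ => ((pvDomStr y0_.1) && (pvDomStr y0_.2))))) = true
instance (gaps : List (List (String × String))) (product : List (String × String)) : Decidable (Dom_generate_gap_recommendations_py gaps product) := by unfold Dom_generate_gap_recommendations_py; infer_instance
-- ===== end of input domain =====

-- B makes a single pass over gaps maintaining four boolean flags (with an early break once
-- all four types are seen) and assembles the list from the flags, instead of A's four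
-- separate filter passes; objective: alternative (same order of cost, different traversal).

-- ===== PORT A =====
-- g['type'] is a dict lookup; Pre_ guarantees the key is present (else Python raises KeyError).
def generate_gap_recommendations_py (gaps : List (List (String × String))) (product : List (String × String)) : List String :=
  let recommendations : List String := []
  let spec_gaps := gaps.filter (fun g => (PySem.Dict.mk g).get? "type" == some "specification")
  let recommendations := if spec_gaps.isEmpty then recommendations else
    recommendations ++ ["Consider specification relaxation or custom manufacturing"]
  let cert_gaps := gaps.filter (fun g => (PySem.Dict.mk g).get? "type" == some "certification")
  let recommendations := if cert_gaps.isEmpty then recommendations else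
    recommendations ++ ["Request manufacturer to obtain missing certifications"]
  let price_gaps := gaps.filter (fun g => (PySem.Dict.mk g).get? "type" == some "price")
  let recommendations := if price_gaps.isEmpty then recommendations else
    recommendations ++ ["Negotiate pricing or increase budget allocation"]
  let delivery_gaps := gaps.filter (fun g => (PySem.Dict.mk g).get? "type" == some "delivery")
  let recommendations := if delivery_gaps.isEmpty then recommendations else
    recommendations ++ ["Adjust project timeline or request expedited delivery"]
  if recommendations.isEmpty then
    recommendations ++ ["Product meets all requirements - proceed with purchase"]
  else recommendations

-- ===== PORT B =====
-- B's for-loop with break, as structural recursion over gaps carrying the four flags.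
-- g['type'] ported as getD "type" "" ; exact under Pre_ (key present).
def pvScan : List (List (String × String)) → Bool → Bool → Bool → Bool → Bool × Bool × Bool × Bool
  | [], s, c, p, d => (s, c, p, d)
  | g :: rest, s, c, p, d =>
    let t := (PySem.Dict.mk g).getD "type" ""
    let st :=
      if t == "specification" then (true, c, p, d)
      else if t == "certification" then (s, true, p, d)
      else if t == "price" then (s, c, true, d)
      else if t == "delivery" then (s, c, p, true)
      else (s, c, p, d)
    if st.1 && st.2.1 && st.2.2.1 && st.2.2.2 then st
    else pvScan rest st.1 st.2.1 st.2.2.1 st.2.2.2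

def generate_gap_recommendations_py_alt (gaps : List (List (String × String))) (product : List (String × String)) : List String :=
  let st := pvScan gaps false false false false
  let recommendations : List String := []
  let recommendations := if st.1 then recommendations ++ ["Consider specification relaxation or custom manufacturing"] else recommendations
  let recommendations := if st.2.1 then recommendations ++ ["Request manufacturer to obtain missing certifications"] else recommendations
  let recommendations := if st.2.2.1 then recommendations ++ ["Negotiate pricing or increase budget allocation"] else recommendations
  let recommendations := if st.2.2.2 then recommendations ++ ["Adjust project timeline or request expedited delivery"] else recommendations
  if recommendations.isEmpty then recommendations ++ ["Product meets all requirements - proceed with purchase"]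
  else recommendations

-- ===== PRECONDITION & SPEC =====
-- Pre_ excludes gaps lacking a 'type' key: there Python A (and, before its early break, B) raise KeyError.
def Pre_generate_gap_recommendations_py (gaps : List (List (String × String))) (product : List (String × String)) : Prop :=
  ∀ g ∈ gaps, (PySem.Dict.mk g).contains "type" = true
instance (gaps : List (List (String × String))) (product : List (String × String)) : Decidable (Pre_generate_gap_recommendations_py gaps product) := by unfold Pre_generate_gap_recommendations_py; infer_instance
def pvWitness_generate_gap_recommendations_py : (List (List (String × String))) × (List (String × String)) :=
  ([[("type", "price")], [("type", "other")]], [("name", "x")])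

def Spec_generate_gap_recommendations_py (gaps : List (List (String × String))) (product : List (String × String)) (out : List String) : Prop := out = generate_gap_recommendations_py_alt gaps product
instance (gaps : List (List (String × String))) (product : List (String × String)) (out : List String) : Decidable (Spec_generate_gap_recommendations_py gaps product out) := by unfold Spec_generate_gap_recommendations_py; infer_instance

-- ===== CLAIM (what is proved, stated in full; the proofs are below) =====
def Claim_equal_generate_gap_recommendations_py : Prop := ∀ (gaps : List (List (String × String))) (product : List (String × String)), Dom_generate_gap_recommendations_py gaps product → Pre_generate_gap_recommendations_py gaps product → Spec_generate_gap_recommendations_py gaps product (generate_gap_recommendations_py gaps product)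

-- ===== LEMMAS AND PROOFS =====

-- The elif chain updates each flag independently (the four type strings are distinct).
lemma pvStep (t : String) (s c p d : Bool) :
    (if t == "specification" then (true, c, p, d)
     else if t == "certification" then (s, true, p, d)
     else if t == "price" then (s, c, true, d)
     else if t == "delivery" then (s, c, p, true)
     else (s, c, p, d))
    = (s || (t == "specification"), c || (t == "certification"),
       p || (t == "price"), d || (t == "delivery")) := by
  by_cases h1 : t = "specification"
  · simp [h1]
  · by_cases h2 : t = "certification"
    · simp [h2]
    · by_cases h3 : t = "price"
      · simp [h3]
      · by_cases h4 : t = "delivery"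
        · simp [h4]
        · simp [h1, h2, h3, h4]

-- The early-exiting scan computes exactly "initial flag OR the type occurs somewhere".
lemma pvScan_closed (gaps : List (List (String × String))) (s c p d : Bool) :
    pvScan gaps s c p d =
      (s || gaps.any (fun g => (PySem.Dict.mk g).getD "type" "" == "specification"),
       c || gaps.any (fun g => (PySem.Dict.mk g).getD "type" "" == "certification"),
       p || gaps.any (fun g => (PySem.Dict.mk g).getD "type" "" == "price"),
       d || gaps.any (fun g => (PySem.Dict.mk g).getD "type" "" == "delivery")) := by
  induction gaps generalizing s c p d with
  | nil => simp [pvScan]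
  | cons g rest ih =>
    simp only [pvScan, List.any_cons, pvStep]
    by_cases hall : ((s || ((PySem.Dict.mk g).getD "type" "" == "specification"))
        && (c || ((PySem.Dict.mk g).getD "type" "" == "certification"))
        && (p || ((PySem.Dict.mk g).getD "type" "" == "price"))
        && (d || ((PySem.Dict.mk g).getD "type" "" == "delivery"))) = true
    · rw [Bool.and_eq_true] at hall
      obtain ⟨hall, e4⟩ := hall
      rw [Bool.and_eq_true] at hall
      obtain ⟨hall, e3⟩ := hall
      rw [Bool.and_eq_true] at hall
      obtain ⟨e1, e2⟩ := hall
      simp only [← Bool.or_assoc, e1, e2, e3, e4, Bool.true_or]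
      simp
    · simp only [hall, if_false, Bool.false_eq_true]
      rw [ih]
      simp [Bool.or_assoc]

-- Under Pre_, A's "filter for type t is nonempty" coincides with "t occurs" as B sees it.
lemma pv_flag (gaps : List (List (String × String))) (t : String)
    (hp : ∀ g ∈ gaps, (PySem.Dict.mk g).contains "type" = true) :
    (gaps.filter (fun g => (PySem.Dict.mk g).get? "type" == some t)).isEmpty
      = !(gaps.any (fun g => (PySem.Dict.mk g).getD "type" "" == t)) := by
  rw [Bool.eq_iff_iff]
  simp only [List.isEmpty_iff, List.filter_eq_nil_iff, Bool.not_eq_true', List.any_eq_false,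
    beq_iff_eq]
  constructor
  · intro h g hg
    have hne := h g hg
    cases hget : (PySem.Dict.mk g).get? "type" with
    | none =>
      have hc := hp g hg
      rw [PySem.Dict.contains_eq_isSome_get?] at hc
      simp [hget] at hc
    | some v =>
      have hv : (PySem.Dict.mk g).getD "type" "" = v := by simp [PySem.Dict.getD, hget]
      rw [hv]
      intro hvt; exact hne (by rw [hget, hvt])
  · intro h g hg hget
    have hv : (PySem.Dict.mk g).getD "type" "" = t := by simp [PySem.Dict.getD, hget]
    exact h g hg hv

theorem generate_gap_recommendations_py_spec : Claim_equal_generate_gap_recommendations_py := by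
  intro gaps product _ hp
  unfold Spec_generate_gap_recommendations_py
  unfold generate_gap_recommendations_py generate_gap_recommendations_py_alt
  rw [pvScan_closed]
  have h1 := pv_flag gaps "specification" hp
  have h2 := pv_flag gaps "certification" hp
  have h3 := pv_flag gaps "price" hp
  have h4 := pv_flag gaps "delivery" hp
  simp only [h1, h2, h3, h4, Bool.false_or]
  generalize gaps.any (fun g => (PySem.Dict.mk g).getD "type" "" == "specification") = b1
  generalize gaps.any (fun g => (PySem.Dict.mk g).getD "type" "" == "certification") = b2
  generalize gaps.any (fun g => (PySem.Dict.mk g).getD "type" "" == "price") = b3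
  generalize gaps.any (fun g => (PySem.Dict.mk g).getD "type" "" == "delivery") = b4
  cases b1 <;> cases b2 <;> cases b3 <;> cases b4 <;> rfl

-- ===== VERDICT (by name: the statement is the Claim_ definition above) =====
-- proved directly above as generate_gap_recommendations_py_spec
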